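-- pv_equiv track=rewrite | github.com/Sovannasam/telegram_bot | bot.py | _preserve_owner_pointer
-- ===== SOURCE A (Python) =====
-- from typing import Dict, Optional, List, Tuple
--
-- def _preserve_owner_pointer(old_list: List[str], new_list: List[str], old_idx: int) -> int:
--     if not new_list: return 0
--     old_list = list(old_list or []);
--     if not old_list: return 0
--     old_idx = old_idx % len(old_list)
--     start_owner = old_list[old_idx]
--     if start_owner in new_list: return new_list.index(start_owner)
--     n = len(old_list)
--     for step in range(1, n + 1):
--         cand = old_list[(old_idx + step) % n]
--         if cand in new_list: return new_list.index(cand)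
--     return 0
-- ===== SOURCE B (Python) =====
-- def _preserve_owner_pointer(old_list, new_list, old_idx):
--     if not new_list:
--         return 0
--     old_list = list(old_list or [])
--     if not old_list:
--         return 0
--     n = len(old_list)
--     present = set(new_list)
--     dists = [(i - old_idx) % n for i, v in enumerate(old_list) if v in present]
--     if not dists:
--         return 0
--     d = min(dists)
--     return new_list.index(old_list[(d + old_idx) % n])
-- ===== Notes on version B (the rewrite author's own statement) =====
-- stated objective: alternative
-- what changed: Replaced the outward cyclic stepping loop (each step scanning new_list for membership) by one pass that builds a set of new_list and a table of forward cyclic distances of surviving old values, then takes the minimum distance and indexes once.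
import Mathlib
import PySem

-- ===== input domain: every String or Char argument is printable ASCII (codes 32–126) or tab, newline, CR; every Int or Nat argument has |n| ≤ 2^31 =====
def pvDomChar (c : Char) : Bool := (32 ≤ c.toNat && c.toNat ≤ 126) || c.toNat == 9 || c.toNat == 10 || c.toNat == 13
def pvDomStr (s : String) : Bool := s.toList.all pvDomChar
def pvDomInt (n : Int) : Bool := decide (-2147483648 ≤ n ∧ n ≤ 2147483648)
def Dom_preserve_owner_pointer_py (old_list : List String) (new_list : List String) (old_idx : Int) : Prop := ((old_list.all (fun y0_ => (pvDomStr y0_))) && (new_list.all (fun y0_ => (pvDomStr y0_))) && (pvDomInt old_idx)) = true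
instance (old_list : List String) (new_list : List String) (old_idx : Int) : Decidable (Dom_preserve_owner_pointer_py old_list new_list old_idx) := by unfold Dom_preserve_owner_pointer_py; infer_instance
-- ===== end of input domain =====

-- B replaces A's outward cyclic stepping loop by a distance table + set + min pass (a different algorithm of similar cost).

-- ===== PORT A =====
-- the 'for step in range(1, n+1)' loop with its early returns
def powLoop (old_list new_list : List String) (oi n : Int) : List Int → Int
  | [] => 0
  | s :: rest =>
    if PySem.List.pyGetD old_list (PySem.Int.mod (oi + s) n) "" ∈ new_list then
      (((PySem.List.index? new_list (PySem.List.pyGetD old_list (PySem.Int.mod (oi + s) n) "")).getD 0 : Nat) : Int)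
    else powLoop old_list new_list oi n rest

def preserve_owner_pointer_py (old_list : List String) (new_list : List String) (old_idx : Int) : Int :=
  if new_list = [] then 0
  else if old_list = [] then 0
  else
    let n : Int := old_list.length
    let oi : Int := PySem.Int.mod old_idx n
    let start := PySem.List.pyGetD old_list oi ""
    if start ∈ new_list then (((PySem.List.index? new_list start).getD 0 : Nat) : Int)
    else powLoop old_list new_list oi n (PySem.List.pyRange 1 (n + 1) 1)

-- ===== PORT B =====
-- the distance-table comprehension: [(i - old_idx) % n for i, v in enumerate(old_list) if v in present]
def powDists (old_list new_list : List String) (old_idx n : Int) : List Int :=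
  (PySem.List.enumerate old_list 0).filterMap
    (fun p => if p.2 ∈ PySem.Set.ofList new_list then some (PySem.Int.mod (p.1 - old_idx) n) else none)

def preserve_owner_pointer_py_alt (old_list : List String) (new_list : List String) (old_idx : Int) : Int :=
  if new_list = [] then 0
  else if old_list = [] then 0
  else
    let n : Int := old_list.length
    let dists := powDists old_list new_list old_idx n
    if dists = [] then 0
    else
      let d := (PySem.List.min? dists (fun x => x)).getD 0
      (((PySem.List.index? new_list (PySem.List.pyGetD old_list (PySem.Int.mod (d + old_idx) n) "")).getD 0 : Nat) : Int)

-- ===== PRECONDITION & SPEC =====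
def Spec_preserve_owner_pointer_py (old_list : List String) (new_list : List String) (old_idx : Int) (out : Int) : Prop := out = preserve_owner_pointer_py_alt old_list new_list old_idx
instance (old_list : List String) (new_list : List String) (old_idx : Int) (out : Int) : Decidable (Spec_preserve_owner_pointer_py old_list new_list old_idx out) := by unfold Spec_preserve_owner_pointer_py; infer_instance

-- ===== CLAIM (what is proved, stated in full; the proofs are below) =====
def Claim_equal_preserve_owner_pointer_py : Prop := ∀ (old_list : List String) (new_list : List String) (old_idx : Int), Dom_preserve_owner_pointer_py old_list new_list old_idx → Spec_preserve_owner_pointer_py old_list new_list old_idx (preserve_owner_pointer_py old_list new_list old_idx)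

-- ===== LEMMAS AND PROOFS =====

-- modular-arithmetic helpers (emod; all moduli positive in use)
theorem pow_emod_add_left (idx x n : Int) : ((idx % n) + x) % n = (idx + x) % n := by
  conv_rhs => rw [Int.add_emod]
  conv_lhs => rw [Int.add_emod, Int.emod_emod_of_dvd _ dvd_rfl]

theorem pow_emod_cancel (idx x n : Int) : (idx + (x - idx) % n) % n = x % n := by
  conv_lhs => rw [Int.add_emod, Int.emod_emod_of_dvd _ dvd_rfl, ← Int.add_emod]
  ring_nf

theorem pow_emod_cancel' (idx x n : Int) : ((idx + x) % n - idx) % n = x % n := by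
  conv_lhs => rw [Int.sub_emod, Int.emod_emod_of_dvd _ dvd_rfl, ← Int.sub_emod]
  ring_nf

-- find? on a strictly increasing list returns the minimal satisfying element
theorem pow_find?_eq_some {p : Int → Bool} : ∀ {l : List Int}, l.Pairwise (· < ·) → ∀ m : Int, m ∈ l → p m = true →
    (∀ y ∈ l, p y = true → m ≤ y) → l.find? p = some m := by
  intro l
  induction l with
  | nil => intro _ m hm; simp at hm
  | cons a t ih =>
    intro hp m hm hpm hmin
    rcases List.pairwise_cons.mp hp with ⟨hat, hpt⟩
    by_cases hpa : p a = true
    · have hma : m ≤ a := hmin a (List.mem_cons_self) hpa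
      have : m = a := by
        rcases List.mem_cons.mp hm with h | h
        · exact h
        · exact absurd (hat m h) (by omega)
      simp [List.find?, hpa, this]
    · have hma : m ≠ a := fun h => hpa (h ▸ hpm)
      have hmt : m ∈ t := by rcases List.mem_cons.mp hm with h | h; exact absurd h hma; exact h
      simp only [List.find?, hpa]
      exact ih hpt m hmt hpm (fun y hy hpy => hmin y (List.mem_cons_of_mem _ hy) hpy)

-- the loop of A is find? over its step list
theorem powLoop_eq_find? (old_list new_list : List String) (oi n : Int) (steps : List Int) :
    powLoop old_list new_list oi n steps =
      match steps.find? (fun s => decide (PySem.List.pyGetD old_list (PySem.Int.mod (oi + s) n) "" ∈ new_list)) with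
      | some s => (((PySem.List.index? new_list (PySem.List.pyGetD old_list (PySem.Int.mod (oi + s) n) "")).getD 0 : Nat) : Int)
      | none => 0 := by
  induction steps with
  | nil => simp [powLoop]
  | cons s rest ih =>
    by_cases h : PySem.List.pyGetD old_list (PySem.Int.mod (oi + s) n) "" ∈ new_list
    · simp [powLoop, List.find?, h]
    · simp [powLoop, List.find?, h, ih]

-- membership characterisation of the distance table
theorem mem_powDists (old_list new_list : List String) (old_idx : Int) (hn : old_list ≠ []) (x : Int) :
    x ∈ powDists old_list new_list old_idx (old_list.length : Int) ↔
      0 ≤ x ∧ x < (old_list.length : Int) ∧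
        PySem.List.pyGetD old_list ((old_idx % (old_list.length : Int) + x) % (old_list.length : Int)) "" ∈ new_list := by
  have hn0 : (0:Int) < (old_list.length : Int) := by
    have := List.length_pos_iff.mpr hn; exact_mod_cast this
  set n : Int := (old_list.length : Int) with hn_def
  constructor
  · intro hx
    rcases List.mem_filterMap.mp hx with ⟨p, hp, hf⟩
    rcases (PySem.List.mem_enumerate_iff old_list 0 p).mp hp with ⟨k, hk, rfl⟩
    by_cases hmem : old_list[k] ∈ PySem.Set.ofList new_list
    · simp only [hmem, if_pos] at hf
      have hx_eq : x = ((k:Int) - old_idx) % n := by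
        have := hf
        simpa [PySem.Int.mod_eq_emod_of_pos hn0] using this.symm
      have hx0 : 0 ≤ x := hx_eq ▸ Int.emod_nonneg _ (ne_of_gt hn0)
      have hxn : x < n := hx_eq ▸ Int.emod_lt_of_pos _ hn0
      refine ⟨hx0, hxn, ?_⟩
      have hidx : (old_idx % n + x) % n = (k:Int) := by
        rw [hx_eq, pow_emod_add_left, pow_emod_cancel]
        exact Int.emod_eq_of_lt (by positivity) (by first | exact_mod_cast hk | (rw [hn_def]; exact_mod_cast hk))
      rw [hidx]
      have : PySem.List.pyGetD old_list (k:Int) "" = old_list[((k:Int)).toNat] :=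
        PySem.List.pyGetD_eq_getElem old_list "" (by positivity) (by exact_mod_cast hk)
      rw [this]
      simpa using (PySem.Set.mem_ofList new_list _).mp hmem
    · simp [hmem] at hf
  · rintro ⟨hx0, hxn, hmem⟩
    have hsum0 : 0 ≤ (old_idx + x) % n := Int.emod_nonneg _ (ne_of_gt hn0)
    have hsumn : (old_idx + x) % n < n := Int.emod_lt_of_pos _ hn0
    set k : Nat := ((old_idx + x) % n).toNat with hk_def
    have hkc : ((k:Int)) = (old_idx + x) % n := Int.toNat_of_nonneg hsum0
    have hk : k < old_list.length := by
      have h' : (k:Int) < n := hkc ▸ hsumn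
      rw [hn_def] at h'
      exact_mod_cast h'
    have hidx : (old_idx % n + x) % n = (k:Int) := by rw [pow_emod_add_left, hkc]
    have hget : PySem.List.pyGetD old_list ((old_idx % n + x) % n) "" = old_list[k] := by
      rw [hidx]
      have := PySem.List.pyGetD_eq_getElem old_list "" (i := (k:Int)) (by positivity) (by exact_mod_cast hk)
      simpa using this
    refine List.mem_filterMap.mpr ⟨((0:Int) + (k:Int), old_list[k]), ?_, ?_⟩
    · exact (PySem.List.mem_enumerate_iff old_list 0 _).mpr ⟨k, hk, rfl⟩
    · have hmem' : old_list[k] ∈ PySem.Set.ofList new_list :=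
        (PySem.Set.mem_ofList new_list _).mpr (by rw [← hget]; exact hmem)
      simp only [hmem', if_pos]
      rw [PySem.Int.mod_eq_emod_of_pos hn0]
      congr 1
      rw [zero_add, hkc, pow_emod_cancel']
      exact Int.emod_eq_of_lt hx0 hxn

-- ===== VERDICT (by name: the statement is the Claim_ definition above) =====
theorem preserve_owner_pointer_py_spec : Claim_equal_preserve_owner_pointer_py := by
  intro old_list new_list old_idx _
  unfold Spec_preserve_owner_pointer_py preserve_owner_pointer_py preserve_owner_pointer_py_alt
  by_cases h1 : new_list = []
  · simp [h1]
  by_cases h2 : old_list = []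
  · simp [h1, h2]
  simp only [if_neg h1, if_neg h2]
  have hn0 : (0:Int) < (old_list.length : Int) := by
    have := List.length_pos_iff.mpr h2; exact_mod_cast this
  set n : Int := (old_list.length : Int) with hn_def
  have hmodid : PySem.Int.mod old_idx n = old_idx % n := PySem.Int.mod_eq_emod_of_pos hn0
  set oi : Int := old_idx % n with hoi_def
  have hoi_mod : oi % n = oi := by rw [hoi_def, Int.emod_emod_of_dvd _ dvd_rfl]
  -- A's start index equals the step-0 candidate index; step-n equals step-0
  have hstart_idx : (oi + 0) % n = oi := by rw [add_zero, hoi_mod]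
  have hstep_n : (oi + n) % n = (oi + 0) % n := by rw [Int.add_emod_right, add_zero]
  rw [hmodid, powLoop_eq_find?]
  by_cases hD : powDists old_list new_list old_idx n = []
  · -- nothing survives: both sides return 0
    have hno : ∀ x : Int, 0 ≤ x → x < n → PySem.List.pyGetD old_list ((oi + x) % n) "" ∉ new_list := by
      intro x hx0 hxn hmem
      have : x ∈ powDists old_list new_list old_idx n :=
        (mem_powDists old_list new_list old_idx h2 x).mpr ⟨hx0, hxn, hmem⟩
      rw [hD] at this; simp at this
    have hstart : PySem.List.pyGetD old_list oi "" ∉ new_list := by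
      have := hno 0 le_rfl hn0
      rwa [hstart_idx] at this
    have hfind : (PySem.List.pyRange 1 (n + 1) 1).find?
        (fun s => decide (PySem.List.pyGetD old_list (PySem.Int.mod (oi + s) n) "" ∈ new_list)) = none := by
      rw [List.find?_eq_none]
      intro s hs
      rcases (PySem.List.mem_pyRange_one).mp hs with ⟨hs1, hs2⟩
      simp only [PySem.Int.mod_eq_emod_of_pos hn0, decide_eq_true_eq]
      by_cases hlt : s < n
      · exact hno s (by omega) hlt
      · have hsn : s = n := by omega
        rw [hsn, hstep_n, hstart_idx]
        exact hstart
    rw [if_neg hstart, hfind, if_pos hD]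
  · -- some old value survives: both sides return the index of the nearest one
    obtain ⟨m, hmin⟩ : ∃ m, PySem.List.min? (powDists old_list new_list old_idx n) (fun x => x) = some m := by
      cases h : PySem.List.min? (powDists old_list new_list old_idx n) (fun x => x) with
      | none => exact absurd ((PySem.List.min?_eq_none_iff _ _).mp h) hD
      | some m => exact ⟨m, rfl⟩
    have hmMem := PySem.List.min?_mem hmin
    have hmLe : ∀ y ∈ powDists old_list new_list old_idx n, m ≤ y := PySem.List.min?_isMin hmin
    rcases (mem_powDists old_list new_list old_idx h2 m).mp hmMem with ⟨hm0, hmn, hmP⟩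
    rw [if_neg hD, hmin]
    have hBidx : PySem.Int.mod (m + old_idx) n = (oi + m) % n := by
      rw [PySem.Int.mod_eq_emod_of_pos hn0, hoi_def, pow_emod_add_left, add_comm]
    rw [Option.getD_some, hBidx]
    by_cases hstart : PySem.List.pyGetD old_list oi "" ∈ new_list
    · -- the current owner survives: m = 0
      have h0mem : (0:Int) ∈ powDists old_list new_list old_idx n :=
        (mem_powDists old_list new_list old_idx h2 0).mpr ⟨le_rfl, hn0, by rwa [hstart_idx]⟩
      have hm_eq : m = 0 := le_antisymm (hmLe 0 h0mem) hm0
      rw [if_pos hstart, hm_eq, hstart_idx]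
    · -- step outward: the loop's find? hits exactly m
      have hm_ne : m ≠ 0 := by
        intro h; apply hstart; rw [← hstart_idx, ← h]; exact hmP
      have hfind : (PySem.List.pyRange 1 (n + 1) 1).find?
          (fun s => decide (PySem.List.pyGetD old_list (PySem.Int.mod (oi + s) n) "" ∈ new_list)) = some m := by
        apply pow_find?_eq_some (PySem.List.pairwise_lt_pyRange_one 1 (n+1))
        · exact (PySem.List.mem_pyRange_one).mpr ⟨by omega, by omega⟩
        · simp only [PySem.Int.mod_eq_emod_of_pos hn0, decide_eq_true_eq]
          exact hmP
        · intro y hy hpy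
          rcases (PySem.List.mem_pyRange_one).mp hy with ⟨hy1, hy2⟩
          simp only [PySem.Int.mod_eq_emod_of_pos hn0, decide_eq_true_eq] at hpy
          by_cases hlt : y < n
          · exact hmLe y ((mem_powDists old_list new_list old_idx h2 y).mpr ⟨by omega, hlt, hpy⟩)
          · have hyn : y = n := by omega
            rw [hyn, hstep_n, hstart_idx] at hpy
            exact absurd hpy hstart
      rw [if_neg hstart, hfind]
      simp only [PySem.Int.mod_eq_emod_of_pos hn0]
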